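-- pv_equiv track=rewrite | github.com/zbum/spam-detector | training/tokenizer.py | _iter_tokens
-- ===== SOURCE A (Python) =====
-- def _iter_tokens(normalized_text: str):
--     i = 0
--     while i < len(normalized_text):
--         for sp in ("<url>", "<phone>"):
--             if normalized_text.startswith(sp, i):
--                 yield sp
--                 i += len(sp)
--                 break
--         else:
--             yield normalized_text[i]
--             i += 1
-- ===== SOURCE B (Python) =====
-- def _iter_tokens(normalized_text: str):
--     s = normalized_text
--     while True:
--         iu = s.find("<url>")
--         ip = s.find("<phone>")
--         if iu == -1 and ip == -1:
--             yield from s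
--             return
--         if iu != -1 and (ip == -1 or iu < ip):
--             yield from s[:iu]
--             yield "<url>"
--             s = s[iu + len("<url>"):]
--         else:
--             yield from s[:ip]
--             yield "<phone>"
--             s = s[ip + len("<phone>"):]
-- ===== Notes on version B (the rewrite author's own statement) =====
-- stated objective: faster
-- what changed: Replaces A's per-character Python scanner (startswith at every index) with a segment-jumping loop: str.find locates the next <url> and <phone> occurrence, the characters before the earlier one are yielded in bulk via slicing, and the loop resumes after the token.
import Mathlib
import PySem

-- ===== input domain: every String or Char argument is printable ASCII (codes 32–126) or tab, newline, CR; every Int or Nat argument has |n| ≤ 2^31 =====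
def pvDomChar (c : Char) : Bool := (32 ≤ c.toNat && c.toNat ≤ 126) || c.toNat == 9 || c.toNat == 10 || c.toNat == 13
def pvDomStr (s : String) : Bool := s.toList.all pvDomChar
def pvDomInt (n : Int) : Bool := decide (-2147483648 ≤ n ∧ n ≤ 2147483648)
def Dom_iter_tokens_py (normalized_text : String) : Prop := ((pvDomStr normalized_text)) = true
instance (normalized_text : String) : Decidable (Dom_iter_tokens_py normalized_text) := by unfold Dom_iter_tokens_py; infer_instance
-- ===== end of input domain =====

-- B replaces A's per-character scanner by jumps between str.find occurrences of the two tokens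
-- (objective: alternative structure; both Pythons are generators, the return sequence is what is proved equal).

-- ===== PORT A =====
-- A scans index by index; ported as structural recursion on the remaining character list
-- (the suffix normalized_text[i:]), which is exact for startswith(sp, i) / text[i].
def iterTokensA : List Char → List String
  | [] => []
  | c :: rest =>
    if "<url>".toList.isPrefixOf (c :: rest) then
      "<url>" :: iterTokensA ((c :: rest).drop ("<url>" : String).length)
    else if "<phone>".toList.isPrefixOf (c :: rest) then
      "<phone>" :: iterTokensA ((c :: rest).drop ("<phone>" : String).length)
    else
      String.mk [c] :: iterTokensA rest
  termination_by l => l.length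
  decreasing_by
  · have h : ("<url>" : String).length = 5 := rfl
    simp [h]
  · have h : ("<phone>" : String).length = 7 := rfl
    simp [h]
  · simp

def iter_tokens_py (normalized_text : String) : List String :=
  iterTokensA normalized_text.toList

-- ===== PORT B =====
def pvSingle (c : Char) : String := String.mk [c]

def iterTokensB (s : List Char) : List String :=
  if PySem.Chars.find s "<url>".toList = -1 ∧ PySem.Chars.find s "<phone>".toList = -1 then
    s.map pvSingle
  else if PySem.Chars.find s "<url>".toList ≠ -1 ∧
      (PySem.Chars.find s "<phone>".toList = -1 ∨
       PySem.Chars.find s "<url>".toList < PySem.Chars.find s "<phone>".toList) then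
    (s.take (PySem.Chars.find s "<url>".toList).toNat).map pvSingle ++
      "<url>" :: iterTokensB (s.drop ((PySem.Chars.find s "<url>".toList).toNat + ("<url>" : String).length))
  else
    (s.take (PySem.Chars.find s "<phone>".toList).toNat).map pvSingle ++
      "<phone>" :: iterTokensB (s.drop ((PySem.Chars.find s "<phone>".toList).toNat + ("<phone>" : String).length))
  termination_by s.length
  decreasing_by
  · have h1 : ("<url>".toList : List Char) <:+: s := by
      have := PySem.Chars.find_ne_neg_one_iff s "<url>".toList
      tauto
    have h2 := h1.length_le
    have h3 : ("<url>".toList).length = 5 := rfl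
    have h4 : ("<url>" : String).length = 5 := rfl
    rw [h3] at h2
    simp only [List.length_drop, h4]
    omega
  · have hip : PySem.Chars.find s "<phone>".toList ≠ -1 := by tauto
    have h1 : ("<phone>".toList : List Char) <:+: s := by
      have := PySem.Chars.find_ne_neg_one_iff s "<phone>".toList
      tauto
    have h2 := h1.length_le
    have h3 : ("<phone>".toList).length = 7 := rfl
    have h4 : ("<phone>" : String).length = 7 := rfl
    rw [h3] at h2
    simp only [List.length_drop, h4]
    omega

def iter_tokens_py_alt (normalized_text : String) : List String :=
  iterTokensB normalized_text.toList

-- ===== PRECONDITION & SPEC =====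
def Spec_iter_tokens_py (normalized_text : String) (out : List String) : Prop := out = iter_tokens_py_alt normalized_text
instance (normalized_text : String) (out : List String) : Decidable (Spec_iter_tokens_py normalized_text out) := by unfold Spec_iter_tokens_py; infer_instance

-- ===== CLAIM (what is proved, stated in full; the proofs are below) =====
def Claim_equal_iter_tokens_py : Prop := ∀ (normalized_text : String), Dom_iter_tokens_py normalized_text → Spec_iter_tokens_py normalized_text (iter_tokens_py normalized_text)

-- ===== LEMMAS AND PROOFS =====

theorem pv_not_both (t : List Char) :
    ¬ ("<url>".toList.IsPrefix t ∧ "<phone>".toList.IsPrefix t) := by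
  rintro ⟨⟨t1, rfl⟩, h2⟩
  simp [List.cons_prefix_cons] at h2

theorem pv_prefix_drop_infix {sub s : List Char} {j : Nat} (h : sub.IsPrefix (s.drop j)) :
    sub <:+: s :=
  h.isInfix.trans (List.drop_suffix j s).isInfix

-- If no token starts anywhere in s, A yields every character.
theorem pv_iterA_nomatch (s : List Char)
    (h : ∀ j, ¬ "<url>".toList.IsPrefix (s.drop j) ∧ ¬ "<phone>".toList.IsPrefix (s.drop j)) :
    iterTokensA s = s.map pvSingle := by
  induction s with
  | nil => simp [iterTokensA]
  | cons c rest ih =>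
    have h0 := h 0
    simp only [List.drop_zero] at h0
    rw [iterTokensA]
    rw [if_neg (by simpa [List.isPrefixOf_iff_prefix] using h0.1),
        if_neg (by simpa [List.isPrefixOf_iff_prefix] using h0.2)]
    simp [pvSingle, ih (fun j => by simpa using h (j + 1))]

-- If the first token occurrence is tok at index n (and, when tok = <phone>, no <url> there),
-- A yields the n leading characters, then tok, then continues after it.
theorem pv_iterA_seg (n : Nat) (s : List Char) (tok : List Char)
    (hfirst : ∀ j < n, ¬ "<url>".toList.IsPrefix (s.drop j) ∧ ¬ "<phone>".toList.IsPrefix (s.drop j))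
    (hmatch : tok.IsPrefix (s.drop n))
    (htok : tok = "<url>".toList ∨ (tok = "<phone>".toList ∧ ¬ "<url>".toList.IsPrefix (s.drop n))) :
    iterTokensA s = (s.take n).map pvSingle ++ String.mk tok :: iterTokensA (s.drop (n + tok.length)) := by
  induction n generalizing s with
  | zero =>
    simp only [List.drop_zero] at hmatch htok
    obtain ⟨t1, rfl⟩ := hmatch
    rcases htok with rfl | ⟨rfl, hnu⟩
    · have hs : "<url>".toList ++ t1 = '<' :: 'u' :: 'r' :: 'l' :: '>' :: t1 := rfl
      rw [hs, iterTokensA]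
      have hpre : "<url>".toList.isPrefixOf ('<' :: 'u' :: 'r' :: 'l' :: '>' :: t1) = true := by
        rw [← hs]; simp
      rw [if_pos hpre]
      simp
      exact ⟨rfl, rfl⟩
    · have hs : "<phone>".toList ++ t1 = '<' :: 'p' :: 'h' :: 'o' :: 'n' :: 'e' :: '>' :: t1 := rfl
      rw [hs] at hnu ⊢
      rw [iterTokensA]
      rw [if_neg (by simpa [List.isPrefixOf_iff_prefix] using hnu),
          if_pos (by rw [← hs]; simp)]
      simp
      exact ⟨rfl, rfl⟩
  | succ n ih =>
    match s with
    | [] =>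
      exfalso
      simp only [List.drop_nil] at hmatch
      rcases htok with rfl | ⟨rfl, _⟩ <;> simp [List.prefix_nil] at hmatch
    | c :: rest =>
      have h0 := hfirst 0 (Nat.succ_pos n)
      simp only [List.drop_zero] at h0
      rw [iterTokensA]
      rw [if_neg (by simpa [List.isPrefixOf_iff_prefix] using h0.1),
          if_neg (by simpa [List.isPrefixOf_iff_prefix] using h0.2)]
      have heq := ih rest
        (fun j hj => by simpa using hfirst (j + 1) (by omega))
        (by simpa using hmatch)
        (by simpa using htok)
      have hdrop : (c :: rest).drop (n + 1 + tok.length) = rest.drop (n + tok.length) := by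
        rw [show n + 1 + tok.length = (n + tok.length) + 1 by omega]
        simp
      rw [hdrop]
      simp [pvSingle, heq]

-- Main equivalence on character lists.
theorem pv_AB (s : List Char) : iterTokensA s = iterTokensB s := by
  induction hn : s.length using Nat.strong_induction_on generalizing s with
  | _ n ih =>
  subst hn
  rw [iterTokensB]
  by_cases hnone : PySem.Chars.find s "<url>".toList = -1 ∧ PySem.Chars.find s "<phone>".toList = -1
  · rw [if_pos hnone]
    refine pv_iterA_nomatch s (fun j => ⟨fun hpre => ?_, fun hpre => ?_⟩)
    · exact ((PySem.Chars.find_eq_neg_one_iff s "<url>".toList).mp hnone.1) (pv_prefix_drop_infix hpre)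
    · exact ((PySem.Chars.find_eq_neg_one_iff s "<phone>".toList).mp hnone.2) (pv_prefix_drop_infix hpre)
  · rw [if_neg hnone]
    have hiu_ge : -1 ≤ PySem.Chars.find s "<url>".toList := PySem.Chars.neg_one_le_find s "<url>".toList
    have hip_ge : -1 ≤ PySem.Chars.find s "<phone>".toList := PySem.Chars.neg_one_le_find s "<phone>".toList
    by_cases hurl : PySem.Chars.find s "<url>".toList ≠ -1 ∧
        (PySem.Chars.find s "<phone>".toList = -1 ∨
         PySem.Chars.find s "<url>".toList < PySem.Chars.find s "<phone>".toList)
    · rw [if_pos hurl]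
      obtain ⟨hm, hmin⟩ := PySem.Chars.find_spec (s := s) (sub := "<url>".toList) (by omega)
      have h5 := hm.length_le
      rw [show ("<url>".toList).length = 5 from rfl] at h5
      rw [List.length_drop] at h5
      rw [pv_iterA_seg (PySem.Chars.find s "<url>".toList).toNat s "<url>".toList
        (fun j hj => ⟨hmin j hj, fun hpre => ?_⟩) hm (Or.inl rfl)]
      · have hrec : iterTokensA (s.drop ((PySem.Chars.find s "<url>".toList).toNat + ("<url>" : String).length))
            = iterTokensB (s.drop ((PySem.Chars.find s "<url>".toList).toNat + ("<url>" : String).length)) := by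
          refine ih _ ?_ _ rfl
          rw [List.length_drop, show ("<url>" : String).length = 5 from rfl]
          omega
        simp only [show ("<url>".toList).length = 5 from rfl,
            show ("<url>" : String).length = 5 from rfl] at hrec ⊢
        rw [hrec]
        rfl
      · -- a <phone> occurrence strictly before the first <url> contradicts the chosen branch
        rcases hurl.2 with hipn | hlt
        · exact ((PySem.Chars.find_eq_neg_one_iff s "<phone>".toList).mp hipn)
            (pv_prefix_drop_infix hpre)
        · obtain ⟨hpm, hpmin⟩ := PySem.Chars.find_spec (s := s) (sub := "<phone>".toList) (by omega)
          exact hpmin j (by omega) hpre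
    · rw [if_neg hurl]
      have hipn : PySem.Chars.find s "<phone>".toList ≠ -1 := by tauto
      obtain ⟨hm, hmin⟩ := PySem.Chars.find_spec (s := s) (sub := "<phone>".toList) (by omega)
      have h7 := hm.length_le
      rw [show ("<phone>".toList).length = 7 from rfl] at h7
      rw [List.length_drop] at h7
      have hnourl : ∀ j ≤ (PySem.Chars.find s "<phone>".toList).toNat,
          ¬ "<url>".toList.IsPrefix (s.drop j) := by
        intro j hj hpre
        have hiun : PySem.Chars.find s "<url>".toList ≠ -1 := by
          intro h
          exact ((PySem.Chars.find_eq_neg_one_iff s "<url>".toList).mp h)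
            (pv_prefix_drop_infix hpre)
        obtain ⟨hum, humin⟩ := PySem.Chars.find_spec (s := s) (sub := "<url>".toList) (by omega)
        have hle : PySem.Chars.find s "<phone>".toList ≤ PySem.Chars.find s "<url>".toList := by
          by_contra hlt
          exact hurl ⟨hiun, Or.inr (by omega)⟩
        by_cases hj2 : j < (PySem.Chars.find s "<url>".toList).toNat
        · exact humin j hj2 hpre
        · have hjeq : j = (PySem.Chars.find s "<url>".toList).toNat := by omega
          have hjeq2 : j = (PySem.Chars.find s "<phone>".toList).toNat := by omega
          exact pv_not_both _ ⟨hpre, hjeq2 ▸ hm⟩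
      rw [pv_iterA_seg (PySem.Chars.find s "<phone>".toList).toNat s "<phone>".toList
        (fun j hj => ⟨hnourl j (by omega), hmin j hj⟩) hm
        (Or.inr ⟨rfl, hnourl _ (le_refl _)⟩)]
      have hrec : iterTokensA (s.drop ((PySem.Chars.find s "<phone>".toList).toNat + ("<phone>" : String).length))
          = iterTokensB (s.drop ((PySem.Chars.find s "<phone>".toList).toNat + ("<phone>" : String).length)) := by
        refine ih _ ?_ _ rfl
        rw [List.length_drop, show ("<phone>" : String).length = 7 from rfl]
        omega
      simp only [show ("<phone>".toList).length = 7 from rfl,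
          show ("<phone>" : String).length = 7 from rfl] at hrec ⊢
      rw [hrec]
      rfl

-- ===== VERDICT (by name: the statement is the Claim_ definition above) =====
theorem iter_tokens_py_spec : Claim_equal_iter_tokens_py := by
  intro t _
  unfold Spec_iter_tokens_py iter_tokens_py iter_tokens_py_alt
  exact pv_AB t.toList
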